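-- pv_equiv track=rewrite | github.com/ccalvar/Libros | Un Enfoque PBL de Pensamiento Crítico y de Diseño aplicado/Codigo Python/Capitulo6.py | ExisteProducto
-- ===== SOURCE A (Python) =====
-- def ExisteProducto(codigo, vproductos):
--     enc = -1
--     pos = 0
--     for ciclo in range(len(vproductos)):
--         if vproductos[ciclo][0].strip() == codigo.strip():
--             enc = pos
--         pos += 1
--     return enc
-- ===== SOURCE B (Python) =====
-- def ExisteProducto(codigo, vproductos):
--     for i in range(len(vproductos) - 1, -1, -1):
--         if vproductos[i][0].strip() == codigo.strip():
--             return i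
--     return -1
-- ===== Notes on version B (the rewrite author's own statement) =====
-- stated objective: alternative
-- what changed: Replaced the forward full scan with a last-wins accumulator by a reverse scan that returns immediately at the first (i.e. last) match.
import Mathlib
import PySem

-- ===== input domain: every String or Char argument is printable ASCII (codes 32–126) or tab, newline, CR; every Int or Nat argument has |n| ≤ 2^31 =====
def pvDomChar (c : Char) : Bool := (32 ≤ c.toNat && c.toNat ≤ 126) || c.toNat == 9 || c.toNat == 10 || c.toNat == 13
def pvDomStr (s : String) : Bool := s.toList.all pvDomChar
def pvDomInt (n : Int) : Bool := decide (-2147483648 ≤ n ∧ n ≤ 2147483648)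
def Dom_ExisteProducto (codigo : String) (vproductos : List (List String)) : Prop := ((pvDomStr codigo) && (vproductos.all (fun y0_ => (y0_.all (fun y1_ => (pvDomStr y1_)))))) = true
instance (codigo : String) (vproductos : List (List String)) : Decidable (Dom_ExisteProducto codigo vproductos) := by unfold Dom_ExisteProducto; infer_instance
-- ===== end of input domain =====

-- B replaces A's forward full scan with last-wins accumulator by a reverse scan returning at the first match (alternative decomposition, same result).


-- ===== PORT A =====
-- forward loop over range(len(vproductos)) with state (enc, pos); under Pre_ every row is
-- nonempty, so the getD defaults are never read (exact there).
def ExisteProducto (codigo : String) (vproductos : List (List String)) : Int :=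
  ((PySem.List.pyRange 0 (vproductos.length : Int) 1).foldl
    (fun (st : Int × Int) ciclo =>
      ( if PySem.Str.strip (PySem.List.pyGetD (PySem.List.pyGetD vproductos ciclo []) 0 "")
            == PySem.Str.strip codigo then st.2 else st.1,
        st.2 + 1))
    (-1, 0)).1

-- ===== PORT B =====
-- reverse early-exit search: index n-1 down to 0, return i at the first match, else -1.
def ExisteProductoRev (codigo : String) (vproductos : List (List String)) : Nat → Int
  | 0 => -1
  | n + 1 =>
    if PySem.Str.strip (PySem.List.pyGetD (PySem.List.pyGetD vproductos (n : Int) []) 0 "")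
        == PySem.Str.strip codigo then (n : Int)
    else ExisteProductoRev codigo vproductos n

def ExisteProducto_alt (codigo : String) (vproductos : List (List String)) : Int :=
  ExisteProductoRev codigo vproductos vproductos.length

-- ===== PRECONDITION & SPEC =====
-- Pre_ excludes exactly the inputs where Python A raises IndexError: a row that is the empty list.
def Pre_ExisteProducto (codigo : String) (vproductos : List (List String)) : Prop :=
  ∀ r ∈ vproductos, r ≠ []
instance (codigo : String) (vproductos : List (List String)) : Decidable (Pre_ExisteProducto codigo vproductos) := by unfold Pre_ExisteProducto; infer_instance
def pvWitness_ExisteProducto : String × List (List String) := ("a ", [["b"], [" a", "x"], ["c"]])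

def Spec_ExisteProducto (codigo : String) (vproductos : List (List String)) (out : Int) : Prop := out = ExisteProducto_alt codigo vproductos
instance (codigo : String) (vproductos : List (List String)) (out : Int) : Decidable (Spec_ExisteProducto codigo vproductos out) := by unfold Spec_ExisteProducto; infer_instance

-- ===== CLAIM (what is proved, stated in full; the proofs are below) =====
def Claim_equal_ExisteProducto : Prop := ∀ (codigo : String) (vproductos : List (List String)), Dom_ExisteProducto codigo vproductos → Pre_ExisteProducto codigo vproductos → Spec_ExisteProducto codigo vproductos (ExisteProducto codigo vproductos)

-- ===== LEMMAS AND PROOFS =====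
-- invariant: the fold over range(0, k) yields (ExisteProductoRev … k, k) — A's accumulator
-- after k steps is exactly B's reverse search over the first k indices.
theorem pvFoldInv (codigo : String) (vproductos : List (List String)) :
    ∀ k : Nat,
      (PySem.List.pyRange 0 (k : Int) 1).foldl
        (fun (st : Int × Int) ciclo =>
          ( if PySem.Str.strip (PySem.List.pyGetD (PySem.List.pyGetD vproductos ciclo []) 0 "")
                == PySem.Str.strip codigo then st.2 else st.1,
            st.2 + 1))
        (-1, 0)
      = (ExisteProductoRev codigo vproductos k, (k : Int)) := by
  intro k
  induction k with
  | zero => simp [ExisteProductoRev]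
  | succ n ih =>
    have h : ((n + 1 : Nat) : Int) = (n : Int) + 1 := by push_cast; ring
    rw [h, PySem.List.pyRange_one_succ_right (by positivity), List.foldl_append, ih]
    simp only [List.foldl_cons, List.foldl_nil, ExisteProductoRev]

-- ===== VERDICT (by name: the statement is the Claim_ definition above) =====
theorem ExisteProducto_spec : Claim_equal_ExisteProducto := by
  intro codigo vproductos _ _
  unfold Spec_ExisteProducto ExisteProducto ExisteProducto_alt
  rw [pvFoldInv]
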